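-- pv_equiv track=rewrite | github.com/feryalicization/Sr_SE_Fery-Chaerul-Ismail_Technical-Assessment_2024-10-13 | test_implementasi_security/test.py | tingkat_kemahiran_maksimal
-- ===== SOURCE A (Python) =====
-- def tingkat_kemahiran_maksimal(N, M, A, B):
--     lawan = list(zip(A, B))
--
--     lawan.sort()
--
--     tingkat_kemahiran_juned = M
--
--     for kemahiran_lawan, kenaikan_kemahiran in lawan:
--         if tingkat_kemahiran_juned >= kemahiran_lawan:
--             tingkat_kemahiran_juned += kenaikan_kemahiran
--         else:
--             break
--
--     return tingkat_kemahiran_juned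
-- ===== SOURCE B (Python) =====
-- def tingkat_kemahiran_maksimal(N, M, A, B):
--     lawan = sorted(zip(A, B))
--     n = len(lawan)
--     # pass 1: cumulative prefix sums of the gain components
--     prefix = [0]
--     acc = 0
--     for _, kenaikan in lawan:
--         acc += kenaikan
--         prefix.append(acc)
--     # pass 2: first index k where Juned's level M + prefix[k] is too low
--     k = 0
--     while k < n and M + prefix[k] >= lawan[k][0]:
--         k += 1
--     return M + prefix[k]
-- ===== Notes on version B (the rewrite author's own statement) =====
-- stated objective: alternative
-- what changed: Replaces A's single interleaved accumulate-and-break loop by two separate passes: one builds the cumulative prefix-sum table of the sorted gains, the other scans indices for the first unbeatable opponent and returns M plus the prefix sum at that break point.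
import Mathlib
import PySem

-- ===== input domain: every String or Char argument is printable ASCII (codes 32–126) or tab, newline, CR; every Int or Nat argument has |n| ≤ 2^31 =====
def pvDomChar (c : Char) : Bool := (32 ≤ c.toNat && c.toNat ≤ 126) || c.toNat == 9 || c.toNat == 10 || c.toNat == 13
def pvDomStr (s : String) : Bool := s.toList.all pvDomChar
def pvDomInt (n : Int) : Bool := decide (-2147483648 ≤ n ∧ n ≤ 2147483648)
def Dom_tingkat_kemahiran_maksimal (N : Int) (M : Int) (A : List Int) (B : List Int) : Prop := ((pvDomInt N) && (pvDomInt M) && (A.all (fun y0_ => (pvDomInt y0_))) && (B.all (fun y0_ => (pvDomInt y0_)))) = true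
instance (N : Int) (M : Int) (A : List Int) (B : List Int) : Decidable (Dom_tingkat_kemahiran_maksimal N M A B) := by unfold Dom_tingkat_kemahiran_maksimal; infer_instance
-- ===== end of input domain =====

-- B separates A's interleaved accumulate-and-break loop into two passes: a prefix-sum table of the sorted gains, then an index scan for the first unbeatable opponent (alternative decomposition, same cost).


-- ===== PORT A =====
-- A's for-loop with break: accumulate while the current level beats the opponent.
def pvLoopA : Int → List (Int × Int) → Int
  | s, [] => s
  | s, p :: t => if s ≥ p.1 then pvLoopA (s + p.2) t else s

def tingkat_kemahiran_maksimal (N : Int) (M : Int) (A : List Int) (B : List Int) : Int :=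
  pvLoopA M (PySem.List.sorted2 (A.zip B) Prod.fst Prod.snd)

-- ===== PORT B =====
-- pass 1 of Source B: prefix = [0]; acc = 0; for _, kenaikan in lawan: acc += kenaikan; prefix.append(acc)
def pvPrefix (lawan : List (Int × Int)) : List Int :=
  (lawan.foldl (fun st p => (st.1 ++ [st.2 + p.2], st.2 + p.2)) (([0] : List Int), (0 : Int))).1

-- pass 2 of Source B: while k < n and M + prefix[k] >= lawan[k][0]: k += 1
def pvFind (M : Int) (lawan : List (Int × Int)) (pre : List Int) (k : Nat) : Int :=
  if h : k < lawan.length then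
    if M + pre.getD k 0 ≥ lawan[k].1 then pvFind M lawan pre (k + 1)
    else M + pre.getD k 0
  else M + pre.getD k 0
termination_by lawan.length - k

def tingkat_kemahiran_maksimal_alt (N : Int) (M : Int) (A : List Int) (B : List Int) : Int :=
  let lawan := PySem.List.sorted2 (A.zip B) Prod.fst Prod.snd
  pvFind M lawan (pvPrefix lawan) 0

-- ===== PRECONDITION & SPEC =====
def Spec_tingkat_kemahiran_maksimal (N : Int) (M : Int) (A : List Int) (B : List Int) (out : Int) : Prop := out = tingkat_kemahiran_maksimal_alt N M A B
instance (N : Int) (M : Int) (A : List Int) (B : List Int) (out : Int) : Decidable (Spec_tingkat_kemahiran_maksimal N M A B out) := by unfold Spec_tingkat_kemahiran_maksimal; infer_instance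

-- ===== CLAIM (what is proved, stated in full; the proofs are below) =====
def Claim_equal_tingkat_kemahiran_maksimal : Prop := ∀ (N : Int) (M : Int) (A : List Int) (B : List Int), Dom_tingkat_kemahiran_maksimal N M A B → Spec_tingkat_kemahiran_maksimal N M A B (tingkat_kemahiran_maksimal N M A B)

-- ===== LEMMAS AND PROOFS =====
-- the running sums produced by pass 1, starting from accumulator s
def pvSums (s : Int) : List (Int × Int) → List Int
  | [] => []
  | p :: t => (s + p.2) :: pvSums (s + p.2) t

theorem pvPrefix_foldl (l : List (Int × Int)) (P : List Int) (s : Int) :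
    (l.foldl (fun st p => (st.1 ++ [st.2 + p.2], st.2 + p.2)) (P, s)).1 = P ++ pvSums s l := by
  induction l generalizing P s with
  | nil => simp [pvSums]
  | cons p t ih => simp [List.foldl, pvSums, ih]

theorem pvPrefix_eq (l : List (Int × Int)) : pvPrefix l = 0 :: pvSums 0 l := by
  simpa using pvPrefix_foldl l [0] 0

theorem pvSums_getD (l : List (Int × Int)) (s : Int) (k : Nat) (hk : k ≤ l.length) :
    (s :: pvSums s l).getD k 0 = s + ((l.take k).map Prod.snd).sum := by
  induction l generalizing s k with
  | nil =>
      have h0 : k = 0 := Nat.le_zero.mp (by simpa using hk)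
      subst h0; simp [pvSums]
  | cons p t ih =>
      cases k with
      | zero => simp
      | succ k =>
          have hk' : k ≤ t.length := by simpa using hk
          have := ih (s + p.2) k hk'
          simp only [pvSums, List.getD_cons_succ, List.take_succ_cons, List.map_cons,
            List.sum_cons] at *
          rw [this]; ring

theorem pvLoopA_cons (s : Int) (p : Int × Int) (t : List (Int × Int)) :
    pvLoopA s (p :: t) = if s ≥ p.1 then pvLoopA (s + p.2) t else s := rfl

theorem pvFind_eq_loopA (M : Int) (t : List (Int × Int)) :
    ∀ (l : List (Int × Int)) (k : Nat), k ≤ l.length → l.drop k = t →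
      pvFind M l (pvPrefix l) k = pvLoopA (M + ((l.take k).map Prod.snd).sum) t := by
  induction t with
  | nil =>
      intro l k hk hd
      have hke : k = l.length := le_antisymm hk (List.drop_eq_nil_iff.mp hd)
      subst hke
      rw [pvFind, dif_neg (lt_irrefl _), pvPrefix_eq, pvSums_getD l 0 l.length le_rfl]
      simp [pvLoopA]
  | cons p t ih =>
      intro l k hk hd
      have hklt : k < l.length := by
        rcases Nat.lt_or_ge k l.length with h | h
        · exact h
        · rw [List.drop_eq_nil_of_le h] at hd; exact absurd hd (by simp)
      have hcons := List.drop_eq_getElem_cons hklt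
      rw [hd] at hcons
      have hget : l[k] = p := (List.cons.injEq _ _ _ _ ▸ hcons).1.symm
      have hdrop : l.drop (k + 1) = t := ((List.cons.injEq _ _ _ _ ▸ hcons).2).symm
      have htake : l.take (k + 1) = l.take k ++ [p] := by
        rw [List.take_add_one]
        simp [List.getElem?_eq_getElem hklt, hget]
      have hpre : (pvPrefix l).getD k 0 = ((l.take k).map Prod.snd).sum := by
        rw [pvPrefix_eq, pvSums_getD l 0 k (le_of_lt hklt)]; ring
      rw [pvFind, dif_pos hklt, hpre, hget, pvLoopA_cons]
      by_cases hc : M + ((l.take k).map Prod.snd).sum ≥ p.1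
      · rw [if_pos hc, if_pos hc, ih l (k + 1) (by omega) hdrop, htake]
        have e : ((l.take k ++ [p]).map Prod.snd).sum
            = ((l.take k).map Prod.snd).sum + p.2 := by simp
        rw [e, add_assoc]
      · rw [if_neg hc, if_neg hc]

-- ===== VERDICT (by name: the statement is the Claim_ definition above) =====
theorem tingkat_kemahiran_maksimal_spec : Claim_equal_tingkat_kemahiran_maksimal := by
  intro N M A B _
  unfold Spec_tingkat_kemahiran_maksimal tingkat_kemahiran_maksimal tingkat_kemahiran_maksimal_alt
  rw [pvFind_eq_loopA M _ _ 0 (Nat.zero_le _) rfl]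
  simp
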